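-- pv_equiv track=rewrite | github.com/joshuabrandes/sourcelab | apps/sidecar/src/sidecar/extractors/html_url.py | _split_markdown_blocks
-- ===== SOURCE A (Python) =====
-- def _split_markdown_blocks(text: str) -> list[str]:
--     """Split on blank lines but keep fenced code blocks intact."""
--     blocks: list[str] = []
--     current: list[str] = []
--     in_fence = False
--     fence_marker = ""
--
--     for line in text.splitlines():
--         stripped = line.strip()
--
--         if not in_fence and (stripped.startswith("```") or stripped.startswith("~~~")):
--             if current:
--                 blocks.append("\n".join(current))
--                 current = []
--             in_fence = True
--             fence_marker = stripped[:3]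
--             current.append(line)
--             continue
--
--         if in_fence:
--             current.append(line)
--             if stripped == fence_marker:
--                 blocks.append("\n".join(current))
--                 current = []
--                 in_fence = False
--             continue
--
--         if not stripped:
--             if current:
--                 blocks.append("\n".join(current))
--                 current = []
--         else:
--             current.append(line)
--
--     if current:
--         blocks.append("\n".join(current))
--
--     return [b for b in blocks if b.strip()]
-- ===== SOURCE B (Python) =====
-- def _split_markdown_blocks(text: str) -> list[str]:
--     """Chunk-at-a-time segmentation: consume a whole fenced region or a whole
--     paragraph per step instead of accumulating line by line with state flags."""
--     lines = text.splitlines()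
--     n = len(lines)
--     out: list[str] = []
--     i = 0
--     while i < n:
--         s = lines[i].strip()
--         if s.startswith("```") or s.startswith("~~~"):
--             marker = s[:3]
--             j = i + 1
--             while j < n and lines[j].strip() != marker:
--                 j += 1
--             end = j + 1 if j < n else n
--             out.append("\n".join(lines[i:end]))
--             i = end
--         elif not s:
--             i += 1
--         else:
--             j = i + 1
--             while j < n:
--                 t = lines[j].strip()
--                 if not t or t.startswith("```") or t.startswith("~~~"):
--                     break
--                 j += 1
--             out.append("\n".join(lines[i:j]))
--             i = j
--     return [b for b in out if b.strip()]
-- ===== Notes on version B (the rewrite author's own statement) =====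
-- stated objective: alternative
-- what changed: Replaces A's stateful line-by-line fold (current accumulator + in_fence/fence_marker flags) with a chunk-at-a-time segmentation: each step consumes an entire fenced region or an entire paragraph via forward lookahead and joins a slice, so no accumulator or fence-state flags exist.
import Mathlib
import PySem

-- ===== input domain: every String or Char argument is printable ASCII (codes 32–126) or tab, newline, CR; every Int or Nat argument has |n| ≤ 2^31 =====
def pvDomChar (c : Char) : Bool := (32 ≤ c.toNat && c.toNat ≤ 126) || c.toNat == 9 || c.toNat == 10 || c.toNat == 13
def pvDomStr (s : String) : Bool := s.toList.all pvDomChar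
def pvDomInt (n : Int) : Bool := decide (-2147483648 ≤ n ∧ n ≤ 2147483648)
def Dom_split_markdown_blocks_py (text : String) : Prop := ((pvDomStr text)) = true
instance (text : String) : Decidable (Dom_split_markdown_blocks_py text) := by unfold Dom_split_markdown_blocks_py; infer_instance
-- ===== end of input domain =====

-- B is an alternative decomposition of the same single pass: chunk-at-a-time segmentation
-- (consume a whole fenced region or paragraph per step) instead of A's stateful accumulator fold.

-- ===== PORT A =====
-- A's loop state: (blocks, current, in_fence, fence_marker)
def aStep (st : List String × List String × Bool × String) (line : String) :
    List String × List String × Bool × String :=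
  let (blocks, current, in_fence, fm) := st
  let stripped := PySem.Str.strip line
  if !in_fence && (PySem.Str.startswith stripped "```" || PySem.Str.startswith stripped "~~~") then
    let blocks := if current.isEmpty then blocks else blocks ++ [PySem.Str.join "\n" current]
    (blocks, [line], true, PySem.Str.slice stripped (some 0) (some 3))
  else if in_fence then
    let current := current ++ [line]
    if stripped == fm then (blocks ++ [PySem.Str.join "\n" current], [], false, fm)
    else (blocks, current, true, fm)
  else if stripped == "" then
    (if current.isEmpty then blocks else blocks ++ [PySem.Str.join "\n" current], [], false, fm)
  else (blocks, current ++ [line], false, fm)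

def split_markdown_blocks_py (text : String) : List String :=
  let st := (PySem.Str.splitlines text).foldl aStep ([], [], false, "")
  let blocks := if st.2.1.isEmpty then st.1 else st.1 ++ [PySem.Str.join "\n" st.2.1]
  blocks.filter (fun b => !(PySem.Str.strip b == ""))

-- ===== PORT B =====
-- scan forward to the closing marker: returns (lines up to and including the closer, rest)
def takeFence (m : String) : List String → List String × List String
  | [] => ([], [])
  | l :: rest =>
    if PySem.Str.strip l == m then ([l], rest)
    else
      let p := takeFence m rest
      (l :: p.1, p.2)

-- scan forward through the paragraph: stop before a blank line or a fence opener
def takePara : List String → List String × List String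
  | [] => ([], [])
  | l :: rest =>
    let t := PySem.Str.strip l
    if t == "" || PySem.Str.startswith t "```" || PySem.Str.startswith t "~~~" then
      ([], l :: rest)
    else
      let p := takePara rest
      (l :: p.1, p.2)

theorem takeFence_snd_le (m : String) (xs : List String) : (takeFence m xs).2.length ≤ xs.length := by
  induction xs with
  | nil => simp [takeFence]
  | cons l rest ih => simp only [takeFence]; split <;> simp <;> omega

theorem takePara_snd_le (xs : List String) : (takePara xs).2.length ≤ xs.length := by
  induction xs with
  | nil => simp [takePara]
  | cons l rest ih => simp only [takePara]; split <;> simp <;> omega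

def bGo : List String → List String
  | [] => []
  | l :: rest =>
    let s := PySem.Str.strip l
    if PySem.Str.startswith s "```" || PySem.Str.startswith s "~~~" then
      let p := takeFence (PySem.Str.slice s (some 0) (some 3)) rest
      PySem.Str.join "\n" (l :: p.1) :: bGo p.2
    else if s == "" then bGo rest
    else
      let p := takePara rest
      PySem.Str.join "\n" (l :: p.1) :: bGo p.2
termination_by xs => xs.length
decreasing_by
  · exact Nat.lt_succ_of_le (takeFence_snd_le _ rest)
  · exact Nat.lt_succ_of_le (Nat.le_refl _)
  · exact Nat.lt_succ_of_le (takePara_snd_le rest)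

def split_markdown_blocks_py_alt (text : String) : List String :=
  (bGo (PySem.Str.splitlines text)).filter (fun b => !(PySem.Str.strip b == ""))

-- ===== PRECONDITION & SPEC =====
def Spec_split_markdown_blocks_py (text : String) (out : List String) : Prop := out = split_markdown_blocks_py_alt text
instance (text : String) (out : List String) : Decidable (Spec_split_markdown_blocks_py text out) := by unfold Spec_split_markdown_blocks_py; infer_instance

-- ===== CLAIM (what is proved, stated in full; the proofs are below) =====
def Claim_equal_split_markdown_blocks_py : Prop := ∀ (text : String), Dom_split_markdown_blocks_py text → Spec_split_markdown_blocks_py text (split_markdown_blocks_py text)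

-- ===== LEMMAS AND PROOFS =====

-- finish = A's post-loop flush of the current accumulator
def aFinish (st : List String × List String × Bool × String) : List String :=
  if st.2.1.isEmpty then st.1 else st.1 ++ [PySem.Str.join "\n" st.2.1]

theorem fence_lemma (m : String) (lines : List String) : ∀ (blocks cur : List String),
    List.foldl aStep (blocks, cur, true, m) lines =
      if lines.any (fun l => PySem.Str.strip l == m) then
        List.foldl aStep
          (blocks ++ [PySem.Str.join "\n" (cur ++ (takeFence m lines).1)], [], false, m)
          (takeFence m lines).2
      else (blocks, cur ++ lines, true, m) := by
  induction lines with
  | nil => intro blocks cur; simp [takeFence]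
  | cons l t ih =>
    intro blocks cur
    by_cases h : PySem.Str.strip l == m
    · simp [aStep, takeFence, h]
    · simp only [List.foldl_cons, aStep, h, List.any_cons, Bool.not_true, Bool.false_and,
        Bool.false_or, if_false, Bool.false_eq_true, if_true]
      rw [ih]
      simp [takeFence, h, List.append_assoc]

theorem para_lemma (lines : List String) : ∀ (blocks cur : List String) (fm : String), cur ≠ [] →
    aFinish (List.foldl aStep (blocks, cur, false, fm) lines) =
      aFinish (List.foldl aStep
        (blocks ++ [PySem.Str.join "\n" (cur ++ (takePara lines).1)], [], false, fm)
        (takePara lines).2) := by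
  induction lines with
  | nil => intro blocks cur fm hc; simp [takePara, aFinish, hc]
  | cons l t ih =>
    intro blocks cur fm hc
    by_cases hstop : (PySem.Str.strip l == "" || PySem.Str.startswith (PySem.Str.strip l) "```"
        || PySem.Str.startswith (PySem.Str.strip l) "~~~") = true
    · -- takePara stops: show both folds agree after one step
      have hstep : aStep (blocks, cur, false, fm) l
          = aStep (blocks ++ [PySem.Str.join "\n" cur], [], false, fm) l := by
        simp only [aStep]
        split_ifs with h1 h2 h3 h4 <;> simp_all
      simp only [takePara, hstop, if_true, List.foldl_cons, hstep, List.append_nil]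
    · simp only [takePara, hstop, if_false, List.foldl_cons, Bool.false_eq_true]
      rw [Bool.or_eq_true, Bool.or_eq_true] at hstop
      push Not at hstop
      obtain ⟨⟨hb, hf1⟩, hf2⟩ := hstop
      have hstep : aStep (blocks, cur, false, fm) l = (blocks, cur ++ [l], false, fm) := by
        simp only [aStep]
        split_ifs with h1 h2 <;> simp_all
      rw [hstep, ih _ _ _ (by simp)]
      simp [List.append_assoc]

theorem takeFence_no_closer (m : String) (lines : List String)
    (h : lines.any (fun l => PySem.Str.strip l == m) = false) : takeFence m lines = (lines, []) := by
  induction lines with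
  | nil => simp [takeFence]
  | cons l t ih =>
    simp only [List.any_cons, Bool.or_eq_false_iff] at h
    simp [takeFence, h.1, ih h.2]

set_option maxHeartbeats 1000000 in
theorem main_lemma (lines : List String) : ∀ (blocks : List String) (fm : String),
    aFinish (List.foldl aStep (blocks, [], false, fm) lines) = blocks ++ bGo lines := by
  induction lines using bGo.induct with
  | case1 => intro blocks fm; simp [aFinish, bGo]
  | case2 l rest s hcond p ih =>
    intro blocks fm
    simp only [s] at hcond
    simp only [p, s] at ih
    clear p s
    rcases (by simpa using hcond :
        PySem.Chars.startswith (PySem.Chars.strip l.toList) ['`', '`', '`'] = true ∨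
        PySem.Chars.startswith (PySem.Chars.strip l.toList) ['~', '~', '~'] = true) with h | h <;>
    · have hstep : aStep (blocks, [], false, fm) l
          = (blocks, [l], true, PySem.Str.slice (PySem.Str.strip l) (some 0) (some 3)) := by
        simp [aStep, h]
      rw [List.foldl_cons, hstep, fence_lemma]
      by_cases hany : (rest.any
          (fun x => PySem.Str.strip x == PySem.Str.slice (PySem.Str.strip l) (some 0) (some 3))) = true
      · rw [if_pos hany, ih]
        simp [bGo, h, List.append_assoc]
      · rw [if_neg hany]
        have hnc := takeFence_no_closer (PySem.Str.slice (PySem.Str.strip l) (some 0) (some 3)) rest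
          (by simpa using hany)
        simp [aFinish, bGo, h, hnc]
  | case3 l rest s hcond hblank ih =>
    intro blocks fm
    simp only [s] at hcond hblank
    clear s
    have hb : PySem.Str.strip l = "" := by simpa using hblank
    have hstep : aStep (blocks, [], false, fm) l = (blocks, [], false, fm) := by
      simp [aStep, hb, show PySem.Chars.startswith [] ['`', '`', '`'] = false from rfl,
        show PySem.Chars.startswith [] ['~', '~', '~'] = false from rfl]
    rw [List.foldl_cons, hstep, ih]
    simp [bGo, hb, show PySem.Chars.startswith [] ['`', '`', '`'] = false from rfl,
      show PySem.Chars.startswith [] ['~', '~', '~'] = false from rfl]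
  | case4 l rest s hcond hblank p ih =>
    intro blocks fm
    simp only [s] at hcond hblank
    simp only [p, s] at ih
    clear p s
    have hno : ¬(PySem.Chars.startswith (PySem.Chars.strip l.toList) ['`', '`', '`'] = true) ∧
        ¬(PySem.Chars.startswith (PySem.Chars.strip l.toList) ['~', '~', '~'] = true) := by
      simpa [not_or] using hcond
    have hb : ¬(PySem.Str.strip l = "") := by simpa using hblank
    have hstep : aStep (blocks, [], false, fm) l = (blocks, [l], false, fm) := by
      simp [aStep, hno.1, hno.2, hb]
    rw [List.foldl_cons, hstep, para_lemma rest blocks [l] fm (by simp), ih]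
    simp [bGo, hno.1, hno.2, hb, List.append_assoc]

-- ===== VERDICT (by name: the statement is the Claim_ definition above) =====
theorem split_markdown_blocks_py_spec : Claim_equal_split_markdown_blocks_py := by
  intro text _
  unfold Spec_split_markdown_blocks_py split_markdown_blocks_py split_markdown_blocks_py_alt
  have h := main_lemma (PySem.Str.splitlines text) [] ""
  simp only [aFinish, List.nil_append] at h
  simp only [h]
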